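-- pv_equiv track=rewrite | github.com/NaN-tic/trytond-babi | cube.py | get_query_list
-- ===== SOURCE A (Python) =====
-- def get_query_list(list):
--     '''
--     Given a list of elements, return a list of all possible coordinates.
--     The structure the function receives is:
--         list: ['Party Name 1', 'Party Name 2']
--     And the structure the function returns is:
--         list_coordinates: [[None, None], ['Party Name 1', None],
--             ['Party Name 1', 'Party Name 2]]
--     '''
--     # Given a list of elements, return a list of all possible coordinates
--     list_coordinates = []
--     default_list_coordinates = [None]*len(list)
--     list_coordinates.append(default_list_coordinates)
--
--     index = 0
--     for element in list:
--         list_coordinates.append(list_coordinates[-1][:index] + [element] +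
--             list_coordinates[-1][index+1:])
--         index += 1
--     return list_coordinates
-- ===== SOURCE B (Python) =====
-- def get_query_list(list):
--     # Each coordinate row is computed directly from the input by index:
--     # row i = first i elements followed by None padding.
--     n = len(list)
--     return [list[:i] + [None] * (n - i) for i in range(n + 1)]
-- ===== Notes on version B (the rewrite author's own statement) =====
-- stated objective: simpler
-- what changed: B computes each coordinate row directly from the input by index (prefix + None padding) instead of mutating a copy of the previously accumulated row.
import Mathlib
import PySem

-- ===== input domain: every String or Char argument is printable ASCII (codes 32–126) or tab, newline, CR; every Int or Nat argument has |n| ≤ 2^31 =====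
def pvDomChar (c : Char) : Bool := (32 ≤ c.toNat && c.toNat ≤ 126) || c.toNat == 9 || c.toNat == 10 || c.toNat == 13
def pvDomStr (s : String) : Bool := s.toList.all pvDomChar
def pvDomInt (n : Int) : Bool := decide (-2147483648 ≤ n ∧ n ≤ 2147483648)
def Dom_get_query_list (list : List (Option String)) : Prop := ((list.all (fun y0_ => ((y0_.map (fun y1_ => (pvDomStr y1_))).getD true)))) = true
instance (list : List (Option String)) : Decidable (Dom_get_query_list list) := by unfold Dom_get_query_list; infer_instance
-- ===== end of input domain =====

-- B builds each coordinate row directly from the input by index (prefix + None padding)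
-- instead of editing the previously accumulated row: simpler decomposition, same cost.


-- ===== PORT A =====
-- the loop body: list_coordinates[-1] is read with getLastD [] (the accumulator is
-- never empty, so the default is never used); slices [:index] and [index+1:] with a
-- nonnegative in-range index are List.take / List.drop, exact here.
def get_query_list_step (st : List (List (Option String)) × Nat) (element : Option String) :
    List (List (Option String)) × Nat :=
  let last := st.1.getLastD []
  (st.1 ++ [last.take st.2 ++ element :: last.drop (st.2 + 1)], st.2 + 1)

def get_query_list (list : List (Option String)) : List (List (Option String)) :=
  let default_list_coordinates : List (Option String) := List.replicate list.length none
  let list_coordinates := [default_list_coordinates]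
  (list.foldl get_query_list_step (list_coordinates, 0)).1

-- ===== PORT B =====
def get_query_list_alt (list : List (Option String)) : List (List (Option String)) :=
  (List.range (list.length + 1)).map
    (fun i => list.take i ++ List.replicate (list.length - i) none)

-- ===== PRECONDITION & SPEC =====
def Spec_get_query_list (list : List (Option String)) (out : List (List (Option String))) : Prop := out = get_query_list_alt list
instance (list : List (Option String)) (out : List (List (Option String))) : Decidable (Spec_get_query_list list out) := by unfold Spec_get_query_list; infer_instance

-- ===== CLAIM (what is proved, stated in full; the proofs are below) =====
def Claim_equal_get_query_list : Prop := ∀ (list : List (Option String)), Dom_get_query_list list → Spec_get_query_list list (get_query_list list)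

-- ===== LEMMAS AND PROOFS =====

def pvRow (l : List (Option String)) (i : Nat) : List (Option String) :=
  l.take i ++ List.replicate (l.length - i) none

theorem pv_fold (l : List (Option String)) : ∀ (rest pre : List (Option String)),
    l = pre ++ rest →
    rest.foldl get_query_list_step ((List.range (pre.length + 1)).map (pvRow l), pre.length)
      = ((List.range (l.length + 1)).map (pvRow l), l.length) := by
  intro rest
  induction rest with
  | nil => intro pre h; simp [h]
  | cons e rest ih =>
    intro pre h
    have hstep : get_query_list_step ((List.range (pre.length + 1)).map (pvRow l), pre.length) e
        = ((List.range (pre.length + 1 + 1)).map (pvRow l), pre.length + 1) := by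
      have hk : pre.length ≤ l.length := by simp [h]
      have htake : (pvRow l pre.length).take pre.length = l.take pre.length := by
        simp [pvRow, List.length_take, Nat.min_eq_left hk]
      have hdrop : (pvRow l pre.length).drop (pre.length + 1)
          = List.replicate (l.length - pre.length - 1) none := by
        have hlt : (l.take pre.length).length = pre.length := by
          simp [List.length_take, Nat.min_eq_left hk]
        rw [pvRow, show pre.length + 1 = (l.take pre.length).length + 1 by rw [hlt]]
        simp [List.drop_append, List.drop_replicate]
      have htakel : l.take pre.length = pre := by simp [h]
      have htakes : l.take (pre.length + 1) = pre ++ [e] := by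
        rw [h]
        simp [List.take_append]
      have hrow : l.take pre.length ++ e :: List.replicate (l.length - pre.length - 1) none
          = pvRow l (pre.length + 1) := by
        have : l.length - pre.length - 1 = l.length - (pre.length + 1) := by omega
        simp [pvRow, htakel, htakes, this]
      simp [get_query_list_step, htake, hdrop, hrow, List.range_succ]
    rw [List.foldl_cons, hstep]
    have := ih (pre ++ [e]) (by simp [h])
    simpa using this

theorem get_query_list_eq (l : List (Option String)) :
    get_query_list l = get_query_list_alt l := by
  have h := pv_fold l l [] rfl
  have h0 : (List.range (0 + 1)).map (pvRow l) = [List.replicate l.length none] := by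
    simp [pvRow]
  unfold get_query_list get_query_list_alt
  simp only [List.length_nil] at h
  rw [h0] at h
  simp [h, pvRow]

-- ===== VERDICT (by name: the statement is the Claim_ definition above) =====
theorem get_query_list_spec : Claim_equal_get_query_list := by
  intro l _
  exact get_query_list_eq l
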